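-- pv_equiv track=rewrite | github.com/jedidiahC/advent-of-code-2025 | 4.py | solve
-- ===== SOURCE A (Python) =====
-- def try_remove(grid: list[list[str]]) -> tuple[int, list[list[str]]]:
--     to_remove = 0
--     new_grid = []
--
--     for row in range(len(grid)):
--         new_grid.append([])
--
--         for col in range(len(grid[0])):
--             adjacent = 0
--
--             # If not roll of paper skip.
--             if grid[row][col] != '@':
--                 new_grid[row].append(grid[row][col])
--                 continue
--
--             for direction in [(-1, -1), (-1, 0), (-1, 1),
--                               (0, -1),          (0, 1),
--                               (1, -1),  (1, 0), (1, 1)]: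
--                 r, c = row + direction[0], col + direction[1]
--
--                 if 0 <= r < len(grid) and 0 <= c < len(grid[0]) and grid[r][c] == '@':
--                     adjacent += 1
--
--             if adjacent < 4:
--                 to_remove += 1
--                 new_grid[row].append('.')
--             else:
--                 new_grid[row].append('@')
--
--     return to_remove, new_grid
--
-- def solve(grid: list[list[str]]):
--     part_one = -1
--     part_two = 0
--
--     removed = 0
--     while True:
--         to_remove, grid = try_remove(grid)
--
--         # If nothing to remove, we are done.
--         if to_remove == 0:
--             break
--
--         part_two += to_remove
--
--         if part_one == -1:
--             part_one = to_remove
--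
--
--     return part_one, part_two
-- ===== SOURCE B (Python) =====
-- DIRS = [(-1, -1), (-1, 0), (-1, 1),
--         (0, -1),           (0, 1),
--         (1, -1),  (1, 0),  (1, 1)]
--
--
-- def solve(grid: list[list[str]]):
--     rows = len(grid)
--     cols = len(grid[0]) if grid else 0
--     live = {(i, j) for i in range(rows) for j in range(cols)
--             if grid[i][j] == '@'}
--
--     def weak(p):
--         i, j = p
--         return sum((i + di, j + dj) in live for di, dj in DIRS) < 4
--
--     wave = {p for p in live if weak(p)}
--     part_one = len(wave) if wave else -1
--     part_two = 0
--     while wave: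
--         part_two += len(wave)
--         live -= wave
--         cand = {(i + di, j + dj) for (i, j) in wave for di, dj in DIRS} & live
--         wave = {p for p in cand if weak(p)}
--     return part_one, part_two
-- ===== Notes on version B (the rewrite author's own statement) =====
-- stated objective: alternative
-- what changed: B replaces A's repeated whole-grid rescans with set-of-coordinates frontier peeling: it builds the set of '@' cells once, finds the first wave by one scan, and thereafter re-examines only the neighbours of the cells removed in the previous wave, so each later wave touches only cells adjacent to just-removed ones instead of the whole grid.
import Mathlib
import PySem

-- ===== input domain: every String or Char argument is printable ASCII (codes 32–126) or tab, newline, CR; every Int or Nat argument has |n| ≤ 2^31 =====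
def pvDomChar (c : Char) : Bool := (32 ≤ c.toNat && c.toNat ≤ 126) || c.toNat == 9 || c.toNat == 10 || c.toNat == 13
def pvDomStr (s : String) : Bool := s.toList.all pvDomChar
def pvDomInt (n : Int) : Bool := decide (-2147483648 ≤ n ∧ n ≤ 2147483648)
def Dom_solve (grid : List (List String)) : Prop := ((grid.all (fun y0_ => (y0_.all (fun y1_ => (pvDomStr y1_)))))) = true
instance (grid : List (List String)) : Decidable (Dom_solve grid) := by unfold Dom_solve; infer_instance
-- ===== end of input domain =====

-- B is a different algorithm: it keeps the '@' cells as a coordinate set and, after the first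
-- wave, re-examines only the neighbours of just-removed cells (a frontier) instead of rescanning
-- the whole grid every round as A does; return values proved equal on Pre_solve.
-- Both while-loops are ported with a fuel parameter (A: number of '@' cells + 1, B: |live| + 1),
-- which the proofs below show is never exhausted (each non-final round removes at least one cell).

-- ===== PORT A =====
-- try_remove's direction table
def pvDirs : List (Int × Int) := [(-1,-1),(-1,0),(-1,1),(0,-1),(0,1),(1,-1),(1,0),(1,1)]

-- the inner direction loop of try_remove
def pvAdjacent (grid : List (List String)) (row col : Int) : Int :=
  pvDirs.foldl (fun adjacent d =>
    let r := row + d.1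
    let c := col + d.2
    if 0 ≤ r ∧ r < (grid.length : Int) ∧ 0 ≤ c ∧ c < ((PySem.List.pyGetD grid 0 []).length : Int)
        ∧ PySem.List.pyGetD (PySem.List.pyGetD grid r []) c "" = "@"
    then adjacent + 1 else adjacent) 0

-- try_remove: nested index loops building (to_remove, new_grid); appending to new_grid[row]
-- is modelled as accumulating the current row and appending it once finished.
def pvTryRemove (grid : List (List String)) : Int × List (List String) :=
  (PySem.List.pyRange 0 (grid.length : Int) 1).foldl (fun st row =>
    let inner := (PySem.List.pyRange 0 (((PySem.List.pyGetD grid 0 []).length : Int)) 1).foldl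
      (fun st2 col =>
        let cell := PySem.List.pyGetD (PySem.List.pyGetD grid row []) col ""
        if cell ≠ "@" then (st2.1, st2.2 ++ [cell])
        else if pvAdjacent grid row col < 4 then (st2.1 + 1, st2.2 ++ ["."])
        else (st2.1, st2.2 ++ ["@"]))
      (st.1, ([] : List String))
    (inner.1, st.2 ++ [inner.2]))
    ((0 : Int), ([] : List (List String)))

-- fuel for A's while-loop: total number of '@' cells + 1 (sufficient: proved below)
def pvCountAllNat (g : List (List String)) : Nat := (g.map (fun row => row.count "@")).sum

-- the while-loop of solve
def pvSolveLoop (fuel : Nat) (partOne partTwo : Int) (grid : List (List String)) : Int × Int :=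
  match fuel with
  | 0 => (partOne, partTwo)
  | fuel + 1 =>
    if (pvTryRemove grid).1 = 0 then (partOne, partTwo)
    else pvSolveLoop fuel (if partOne = -1 then (pvTryRemove grid).1 else partOne)
      (partTwo + (pvTryRemove grid).1) (pvTryRemove grid).2

def solve (grid : List (List String)) : List Int :=
  [(pvSolveLoop (pvCountAllNat grid + 1) (-1) 0 grid).1,
   (pvSolveLoop (pvCountAllNat grid + 1) (-1) 0 grid).2]

-- ===== PORT B =====
def bDirs : List (Int × Int) := [(-1,-1),(-1,0),(-1,1),(0,-1),(0,1),(1,-1),(1,0),(1,1)]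

-- {(i, j) for i in range(rows) for j in range(cols) if grid[i][j] == '@'}
def bLive (grid : List (List String)) (rows cols : Int) : PySem.Set (Int × Int) :=
  PySem.Set.ofList ((PySem.List.pyRange 0 rows 1).flatMap (fun i =>
    ((PySem.List.pyRange 0 cols 1).filter (fun j =>
      PySem.List.pyGetD (PySem.List.pyGetD grid i []) j "" = "@")).map (fun j => (i, j))))

-- weak(p): p has fewer than 4 live 8-neighbours
def bWeak (live : PySem.Set (Int × Int)) (p : Int × Int) : Bool :=
  decide (((bDirs.map (fun d =>
    if PySem.Set.contains live (p.1 + d.1, p.2 + d.2) then (1 : Int) else 0)).sum) < 4)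

-- the while-loop of B: peel the current wave, build the candidate frontier, filter it
def bLoop (fuel : Nat) (live wave : PySem.Set (Int × Int)) (partTwo : Int) : Int :=
  match fuel with
  | 0 => partTwo
  | fuel + 1 =>
    if wave = [] then partTwo
    else
      let partTwo' := partTwo + PySem.Set.len wave
      let live' := PySem.Set.diff live wave
      let cand := PySem.Set.inter
        (PySem.Set.ofList (wave.flatMap (fun p => bDirs.map (fun d => (p.1 + d.1, p.2 + d.2)))))
        live'
      bLoop fuel live' (PySem.Set.ofList (cand.filter (fun p => bWeak live' p))) partTwo'

def solve_alt (grid : List (List String)) : List Int :=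
  let rows : Int := (grid.length : Int)
  let cols : Int := if grid = [] then 0 else ((PySem.List.pyGetD grid 0 []).length : Int)
  let live := bLive grid rows cols
  let wave := PySem.Set.ofList (live.filter (fun p => bWeak live p))
  let partOne : Int := if wave = [] then -1 else PySem.Set.len wave
  [partOne, bLoop (live.length + 1) live wave 0]

-- ===== PRECONDITION & SPEC =====
-- Pre_ excludes exactly the inputs where A raises: nonempty grids with a row shorter than the
-- first row (grid[row][col] raises IndexError for col past that row's end).
def Pre_solve (grid : List (List String)) : Prop :=
  ∀ row ∈ grid, (grid.headD []).length ≤ row.length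

instance (grid : List (List String)) : Decidable (Pre_solve grid) := by
  unfold Pre_solve; infer_instance

def pvWitness_solve : List (List String) := [["@", "@"], [".", "@"]]

def Spec_solve (grid : List (List String)) (out : List Int) : Prop := out = solve_alt grid
instance (grid : List (List String)) (out : List Int) : Decidable (Spec_solve grid out) := by
  unfold Spec_solve; infer_instance

-- ===== CLAIM (what is proved, stated in full; the proofs are below) =====
def Claim_equal_solve : Prop :=
  ∀ (grid : List (List String)), Dom_solve grid → Pre_solve grid → Spec_solve grid (solve grid)

-- ===== LEMMAS AND PROOFS =====

-- abbreviations for A's cell reads and branch results (definitionally what the port computes)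
def pvScan (g : List (List String)) (row col : Int) : String :=
  PySem.List.pyGetD (PySem.List.pyGetD g row []) col ""

def pvDelta (g : List (List String)) (row col : Int) : Int :=
  if pvScan g row col ≠ "@" then 0 else if pvAdjacent g row col < 4 then 1 else 0

def pvOut (g : List (List String)) (row col : Int) : String :=
  if pvScan g row col ≠ "@" then pvScan g row col
  else if pvAdjacent g row col < 4 then "." else "@"

def pvInd (s : String) : Int := if s = "@" then 1 else 0

def pvIndO : Option String → Int
  | some s => if s = "@" then 1 else 0
  | none => 0

-- the (guarded) live indicator of position (r, c)
def pvAt (g : List (List String)) (r c : Int) : Int :=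
  if 0 ≤ r ∧ 0 ≤ c then pvIndO ((g[r.toNat]?).bind (fun row => row[c.toNat]?)) else 0

-- number of live 8-neighbours, as a sum of indicators
def pvDeg (g : List (List String)) (r c : Int) : Int :=
  (pvDirs.map (fun d => pvAt g (r + d.1) (c + d.2))).sum

-- rectangular grid: every row as long as the first
def pvRect (g : List (List String)) : Prop :=
  ∀ row ∈ g, row.length = (PySem.List.pyGetD g 0 []).length

-- S is exactly the set of live cells of g
def pvGood (g : List (List String)) (S : List (Int × Int)) : Prop :=
  S.Nodup ∧ ∀ p : Int × Int, p ∈ S ↔ pvAt g p.1 p.2 = 1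

-- the canonical enumeration of grid positions
def pvAllPos (rows cols : Int) : List (Int × Int) :=
  (PySem.List.pyRange 0 rows 1).flatMap (fun i =>
    (PySem.List.pyRange 0 cols 1).map (fun j => (i, j)))

-- the synchronous removal result, as a plain double map (shown equal to (pvTryRemove g).2)
def pvGrid' (g : List (List String)) : List (List String) :=
  (List.range g.length).map (fun i =>
    (List.range ((PySem.List.pyGetD g 0 []).length)).map (fun k => pvOut g (Int.ofNat i) (Int.ofNat k)))

lemma pvFoldlPair {α β : Type} (δ : α → Int) (out : α → β) :
    ∀ (L : List α) (a : Int) (xs : List β),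
      L.foldl (fun st c => (st.1 + δ c, st.2 ++ [out c])) (a, xs)
        = (a + (L.map δ).sum, xs ++ L.map out) := by
  intro L
  induction L with
  | nil => intro a xs; simp
  | cons c L ih =>
    intro a xs
    simp only [List.foldl_cons, List.map_cons, List.sum_cons, ih]
    simp [add_assoc]

lemma pvTryRemove_eq (g : List (List String)) :
    pvTryRemove g =
      (((PySem.List.pyRange 0 (g.length : Int) 1).map (fun row =>
          ((PySem.List.pyRange 0 (((PySem.List.pyGetD g 0 []).length : Int)) 1).map
            (fun col => pvDelta g row col)).sum)).sum,
       (PySem.List.pyRange 0 (g.length : Int) 1).map (fun row =>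
          (PySem.List.pyRange 0 (((PySem.List.pyGetD g 0 []).length : Int)) 1).map
            (fun col => pvOut g row col))) := by
  unfold pvTryRemove
  have hin : ∀ (row a : Int),
      (PySem.List.pyRange 0 (((PySem.List.pyGetD g 0 []).length : Int)) 1).foldl
        (fun st2 col =>
          let cell := PySem.List.pyGetD (PySem.List.pyGetD g row []) col ""
          if cell ≠ "@" then (st2.1, st2.2 ++ [cell])
          else if pvAdjacent g row col < 4 then (st2.1 + 1, st2.2 ++ ["."])
          else (st2.1, st2.2 ++ ["@"]))
        (a, ([] : List String))
      = (a + ((PySem.List.pyRange 0 (((PySem.List.pyGetD g 0 []).length : Int)) 1).map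
            (fun col => pvDelta g row col)).sum,
         (PySem.List.pyRange 0 (((PySem.List.pyGetD g 0 []).length : Int)) 1).map
            (fun col => pvOut g row col)) := by
    intro row a
    have hfun : (fun (st2 : Int × List String) col =>
          let cell := PySem.List.pyGetD (PySem.List.pyGetD g row []) col ""
          if cell ≠ "@" then (st2.1, st2.2 ++ [cell])
          else if pvAdjacent g row col < 4 then (st2.1 + 1, st2.2 ++ ["."])
          else (st2.1, st2.2 ++ ["@"]))
        = (fun st2 col => (st2.1 + pvDelta g row col, st2.2 ++ [pvOut g row col])) := by
      funext st2 col
      simp only [pvDelta, pvOut, pvScan]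
      split_ifs <;> simp
    rw [hfun, pvFoldlPair]
    simp
  have hout : (fun (st : Int × List (List String)) row =>
        let inner := (PySem.List.pyRange 0 (((PySem.List.pyGetD g 0 []).length : Int)) 1).foldl
          (fun st2 col =>
            let cell := PySem.List.pyGetD (PySem.List.pyGetD g row []) col ""
            if cell ≠ "@" then (st2.1, st2.2 ++ [cell])
            else if pvAdjacent g row col < 4 then (st2.1 + 1, st2.2 ++ ["."])
            else (st2.1, st2.2 ++ ["@"]))
          (st.1, ([] : List String))
        (inner.1, st.2 ++ [inner.2]))
      = (fun st row => (st.1 + ((PySem.List.pyRange 0 (((PySem.List.pyGetD g 0 []).length : Int)) 1).map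
            (fun col => pvDelta g row col)).sum,
          st.2 ++ [(PySem.List.pyRange 0 (((PySem.List.pyGetD g 0 []).length : Int)) 1).map
            (fun col => pvOut g row col)])) := by
    funext st row
    simp only [hin]
  rw [hout, pvFoldlPair]
  simp

lemma pvGuard_eq (g : List (List String)) (hR : pvRect g) (r c x : Int) :
    (if 0 ≤ r ∧ r < (g.length : Int) ∧ 0 ≤ c ∧ c < ((PySem.List.pyGetD g 0 []).length : Int)
        ∧ PySem.List.pyGetD (PySem.List.pyGetD g r []) c "" = "@" then x + 1 else x)
      = x + pvAt g r c := by
  by_cases h : 0 ≤ r ∧ r < (g.length : Int) ∧ 0 ≤ c ∧ c < ((PySem.List.pyGetD g 0 []).length : Int)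
      ∧ PySem.List.pyGetD (PySem.List.pyGetD g r []) c "" = "@"
  · obtain ⟨h0, h1, h2, h3, h4⟩ := h
    have hrn : r.toNat < g.length := by omega
    have hrow : g[r.toNat]? = some g[r.toNat] := List.getElem?_eq_getElem hrn
    have hlen : g[r.toNat].length = (PySem.List.pyGetD g 0 []).length :=
      hR _ (List.getElem_mem hrn)
    have hcn : c.toNat < g[r.toNat].length := by omega
    have hcell : g[r.toNat][c.toNat] = "@" := by
      rw [PySem.List.pyGetD_eq_getElem g [] h0 h1] at h4
      rw [PySem.List.pyGetD_eq_getElem _ "" h2 (by exact_mod_cast hlen ▸ h3)] at h4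
      exact h4
    rw [if_pos ⟨h0, h1, h2, h3, ‹_›⟩]
    unfold pvAt
    rw [if_pos ⟨h0, h2⟩, hrow]
    simp [List.getElem?_eq_getElem hcn, pvIndO, hcell]
  · rw [if_neg h]
    suffices hs : pvAt g r c = 0 by omega
    unfold pvAt
    by_cases hrc : 0 ≤ r ∧ 0 ≤ c
    · rw [if_pos hrc]
      obtain ⟨h0, h2⟩ := hrc
      by_cases h1 : r < (g.length : Int)
      · have hrn : r.toNat < g.length := by omega
        have hlen : g[r.toNat].length = (PySem.List.pyGetD g 0 []).length :=
          hR _ (List.getElem_mem hrn)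
        by_cases h3 : c < ((PySem.List.pyGetD g 0 []).length : Int)
        · have hcn : c.toNat < g[r.toNat].length := by omega
          have h4 : ¬ PySem.List.pyGetD (PySem.List.pyGetD g r []) c "" = "@" := by
            intro hcontr; exact h ⟨h0, h1, h2, h3, hcontr⟩
          rw [PySem.List.pyGetD_eq_getElem g [] h0 h1] at h4
          rw [PySem.List.pyGetD_eq_getElem _ "" h2 (by exact_mod_cast hlen ▸ h3)] at h4
          simp [List.getElem?_eq_getElem hrn, List.getElem?_eq_getElem hcn, pvIndO, h4]
        · have : g[r.toNat].length ≤ c.toNat := by omega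
          simp [List.getElem?_eq_getElem hrn, List.getElem?_eq_none_iff.mpr this, pvIndO]
      · have : g.length ≤ r.toNat := by omega
        simp [List.getElem?_eq_none_iff.mpr this, pvIndO]
    · rw [if_neg hrc]

-- pvAt is a 0/1 indicator
lemma pvAt01 (g : List (List String)) (r c : Int) : pvAt g r c = 0 ∨ pvAt g r c = 1 := by
  unfold pvAt
  split_ifs
  · cases h : (g[r.toNat]?).bind (fun row => row[c.toNat]?) with
    | none => left; rfl
    | some s => simp only [pvIndO]; split_ifs <;> simp
  · left; rfl

-- a live cell is in bounds
lemma pvAt_one_bounds (g : List (List String)) (hR : pvRect g) (r c : Int)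
    (h : pvAt g r c = 1) :
    0 ≤ r ∧ r < (g.length : Int) ∧ 0 ≤ c ∧ c < ((PySem.List.pyGetD g 0 []).length : Int) := by
  unfold pvAt at h
  by_cases hrc : 0 ≤ r ∧ 0 ≤ c
  · rw [if_pos hrc] at h
    cases hrow : g[r.toNat]? with
    | none => rw [hrow] at h; simp [pvIndO] at h
    | some row =>
      cases hc : row[c.toNat]? with
      | none => simp [hrow, hc, pvIndO] at h
      | some s =>
        have hrn : r.toNat < g.length := List.getElem?_eq_some_iff.mp hrow |>.1
        have hcn : c.toNat < row.length := List.getElem?_eq_some_iff.mp hc |>.1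
        have hrowmem : row ∈ g := by
          have := List.getElem?_eq_some_iff.mp hrow
          obtain ⟨hlt, heq⟩ := this
          exact heq ▸ List.getElem_mem hlt
        have hlen := hR row hrowmem
        exact ⟨hrc.1, by omega, hrc.2, by omega⟩
  · rw [if_neg hrc] at h; simp at h

-- in-bounds, pvAt is the indicator of the scanned cell
lemma pvAt_ind (g : List (List String)) (hR : pvRect g) (r c : Int)
    (h0 : 0 ≤ r) (h1 : r < (g.length : Int)) (h2 : 0 ≤ c)
    (h3 : c < ((PySem.List.pyGetD g 0 []).length : Int)) :
    pvAt g r c = pvInd (pvScan g r c) := by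
  have hrn : r.toNat < g.length := by omega
  have hlen : g[r.toNat].length = (PySem.List.pyGetD g 0 []).length :=
    hR _ (List.getElem_mem hrn)
  have hcn : c.toNat < g[r.toNat].length := by omega
  unfold pvAt pvScan
  rw [if_pos ⟨h0, h2⟩, List.getElem?_eq_getElem hrn]
  rw [PySem.List.pyGetD_eq_getElem g [] h0 h1, PySem.List.pyGetD_eq_getElem _ "" h2 (by exact_mod_cast hlen ▸ h3)]
  simp [List.getElem?_eq_getElem hcn, pvIndO, pvInd]

-- A's adjacency count is the degree
lemma pvAdjacent_eq_deg (g : List (List String)) (hR : pvRect g) (r c : Int) :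
    pvAdjacent g r c = pvDeg g r c := by
  unfold pvAdjacent pvDeg
  have hfun : (fun (adjacent : Int) (d : Int × Int) =>
      let r' := r + d.1
      let c' := c + d.2
      if 0 ≤ r' ∧ r' < (g.length : Int) ∧ 0 ≤ c' ∧ c' < ((PySem.List.pyGetD g 0 []).length : Int)
          ∧ PySem.List.pyGetD (PySem.List.pyGetD g r' []) c' "" = "@"
      then adjacent + 1 else adjacent)
      = (fun adjacent d => adjacent + pvAt g (r + d.1) (c + d.2)) := by
    funext a d
    exact pvGuard_eq g hR (r + d.1) (c + d.2) a
  rw [hfun, PySem.List.foldl_add]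
  simp

-- B's neighbour sum is the degree (under pvGood)
lemma bWeak_iff (g : List (List String)) (S : List (Int × Int)) (hG : pvGood g S)
    (p : Int × Int) : bWeak S p = true ↔ pvDeg g p.1 p.2 < 4 := by
  unfold bWeak
  rw [decide_eq_true_iff]
  have hbd : bDirs = pvDirs := rfl
  rw [hbd]
  have hmc : (pvDirs.map (fun d =>
      if PySem.Set.contains S (p.1 + d.1, p.2 + d.2) then (1 : Int) else 0)) =
      (pvDirs.map (fun d => pvAt g (p.1 + d.1) (p.2 + d.2))) := by
    apply List.map_congr_left
    intro d _
    by_cases h : pvAt g (p.1 + d.1) (p.2 + d.2) = 1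
    · rw [if_pos, h]
      rw [PySem.Set.contains_iff]
      exact (hG.2 _).mpr h
    · rcases pvAt01 g (p.1 + d.1) (p.2 + d.2) with h0 | h1
      · rw [if_neg, h0]
        rw [PySem.Set.contains_iff]
        intro hmem
        exact h ((hG.2 _).mp hmem)
      · exact absurd h1 h
  unfold pvDeg
  rw [hmc]

-- equal-membership nodup lists have equal length
lemma pvLenEq {α : Type} (l₁ l₂ : List α) (h₁ : l₁.Nodup) (h₂ : l₂.Nodup)
    (h : ∀ a, a ∈ l₁ ↔ a ∈ l₂) : l₁.length = l₂.length :=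
  ((List.perm_ext_iff_of_nodup h₁ h₂).mpr h).length_eq

lemma pvMem_allPos (rows cols : Int) (p : Int × Int) :
    p ∈ pvAllPos rows cols ↔ 0 ≤ p.1 ∧ p.1 < rows ∧ 0 ≤ p.2 ∧ p.2 < cols := by
  unfold pvAllPos
  simp only [List.mem_flatMap, List.mem_map, PySem.List.mem_pyRange_one]
  constructor
  · rintro ⟨i, hi, j, hj, rfl⟩
    exact ⟨hi.1, hi.2, hj.1, hj.2⟩
  · rintro ⟨h0, h1, h2, h3⟩
    exact ⟨p.1, ⟨h0, h1⟩, p.2, ⟨h2, h3⟩, rfl⟩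

lemma pvNodup_allPos (rowsN colsN : Nat) : (pvAllPos (rowsN : Int) (colsN : Int)).Nodup := by
  unfold pvAllPos
  rw [PySem.List.pyRange_zero_natCast, PySem.List.pyRange_zero_natCast, List.flatMap_map]
  rw [List.nodup_flatMap]
  refine ⟨?_, ?_⟩
  · intro x _
    simp only [Function.comp_def, List.map_map]
    apply List.Nodup.map
    · intro a b hab
      simpa using congrArg Prod.snd hab
    · exact List.nodup_range
  · apply List.Pairwise.imp ?_ (List.pairwise_lt_range (n := rowsN))
    intro a b hab p hp hq
    simp only [Function.comp_def, List.map_map, List.mem_map] at hp hq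
    obtain ⟨j1, _, rfl⟩ := hp
    obtain ⟨j2, _, h2⟩ := hq
    have := congrArg Prod.fst h2
    simp at this
    omega

-- casting a sum of naturals
lemma pvSumCastNat {α : Type} (l : List α) (f : α → Nat) :
    (l.map (fun x => ((f x : Nat) : Int))).sum = (((l.map f).sum : Nat) : Int) := by
  induction l with
  | nil => simp
  | cons a t ih => simp [ih]

-- in-bounds cell is the 0/1 test on the scanned value
lemma pvAt_one_iff_scan (g : List (List String)) (hR : pvRect g) (r c : Int)
    (h0 : 0 ≤ r) (h1 : r < (g.length : Int)) (h2 : 0 ≤ c)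
    (h3 : c < ((PySem.List.pyGetD g 0 []).length : Int)) :
    pvAt g r c = 1 ↔ pvScan g r c = "@" := by
  rw [pvAt_ind g hR r c h0 h1 h2 h3]
  unfold pvInd
  split_ifs with h
  · simp [h]
  · simp [h]

-- A's removal count equals the size of any nodup wave list with the right membership
lemma pvTryRemove_fst (g : List (List String)) (hR : pvRect g)
    (W : List (Int × Int)) (hN : W.Nodup)
    (hW : ∀ p : Int × Int, p ∈ W ↔ pvAt g p.1 p.2 = 1 ∧ pvDeg g p.1 p.2 < 4) :
    (pvTryRemove g).1 = (W.length : Int) := by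
  rw [pvTryRemove_eq g]
  dsimp only
  have hrow : ∀ row : Int, 0 ≤ row → row < (g.length : Int) →
      ((PySem.List.pyRange 0 (((PySem.List.pyGetD g 0 []).length : Int)) 1).map
        (fun col => pvDelta g row col)).sum
      = (((PySem.List.pyRange 0 (((PySem.List.pyGetD g 0 []).length : Int)) 1).countP
          (fun col => decide (pvAt g row col = 1 ∧ pvDeg g row col < 4)) : Nat) : Int) := by
    intro row h0 h1
    have hmc : ((PySem.List.pyRange 0 (((PySem.List.pyGetD g 0 []).length : Int)) 1).map
        (fun col => pvDelta g row col))
        = ((PySem.List.pyRange 0 (((PySem.List.pyGetD g 0 []).length : Int)) 1).map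
          (fun col => if (fun col => decide (pvAt g row col = 1 ∧ pvDeg g row col < 4)) col
            then (1 : Int) else 0)) := by
      apply List.map_congr_left
      intro col hcol
      rw [PySem.List.mem_pyRange_one] at hcol
      have hiff := pvAt_one_iff_scan g hR row col h0 h1 (by omega) (by omega)
      unfold pvDelta
      rw [pvAdjacent_eq_deg g hR]
      by_cases hsc : pvScan g row col = "@"
      · by_cases hd : pvDeg g row col < 4
        · simp [hsc, hd, hiff.mpr hsc]
        · simp [hsc, hd]
      · have hne1 : ¬ pvAt g row col = 1 := fun hx => hsc (hiff.mp hx)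
        simp [hsc, hne1]
    rw [hmc, PySem.List.sum_map_ite_one_zero]
  have hsum : ((PySem.List.pyRange 0 ((g.length : Int)) 1).map (fun row =>
      ((PySem.List.pyRange 0 (((PySem.List.pyGetD g 0 []).length : Int)) 1).map
        (fun col => pvDelta g row col)).sum))
      = ((PySem.List.pyRange 0 ((g.length : Int)) 1).map (fun row =>
        (((PySem.List.pyRange 0 (((PySem.List.pyGetD g 0 []).length : Int)) 1).countP
          (fun col => decide (pvAt g row col = 1 ∧ pvDeg g row col < 4)) : Nat) : Int))) := by
    apply List.map_congr_left
    intro row hr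
    rw [PySem.List.mem_pyRange_one] at hr
    exact hrow row hr.1 hr.2
  rw [hsum, pvSumCastNat]
  have hflat : ((PySem.List.pyRange 0 ((g.length : Int)) 1).map (fun row =>
      (PySem.List.pyRange 0 (((PySem.List.pyGetD g 0 []).length : Int)) 1).countP
        (fun col => decide (pvAt g row col = 1 ∧ pvDeg g row col < 4)))).sum
      = (pvAllPos (g.length : Int) (((PySem.List.pyGetD g 0 []).length : Int))).countP
          (fun p => decide (pvAt g p.1 p.2 = 1 ∧ pvDeg g p.1 p.2 < 4)) := by
    unfold pvAllPos
    rw [List.countP_flatMap]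
    apply congrArg
    apply List.map_congr_left
    intro row _
    rw [Function.comp_apply, List.countP_map]
    rfl
  rw [hflat]
  congr 1
  rw [List.countP_eq_length_filter]
  apply pvLenEq
  · exact (pvNodup_allPos g.length ((PySem.List.pyGetD g 0 []).length)).filter _
  · exact hN
  · intro p
    rw [List.mem_filter, pvMem_allPos]
    constructor
    · rintro ⟨-, hpred⟩
      exact (hW p).mpr (by simpa using hpred)
    · intro hp
      have hx := (hW p).mp hp
      have hb := pvAt_one_bounds g hR p.1 p.2 hx.1
      exact ⟨hb, by simpa using hx⟩

-- (pvTryRemove g).2 as a plain double map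
lemma pvTryRemove_snd (g : List (List String)) : (pvTryRemove g).2 = pvGrid' g := by
  rw [pvTryRemove_eq g]
  dsimp only
  unfold pvGrid'
  rw [PySem.List.pyRange_zero_natCast, PySem.List.pyRange_zero_natCast, List.map_map]
  apply List.map_congr_left
  intro i _
  simp only [Function.comp_apply, List.map_map]
  rfl

-- the new grid is rectangular
lemma pvGrid'_cols (g : List (List String)) (h : g ≠ []) :
    (PySem.List.pyGetD (pvGrid' g) 0 []).length = (PySem.List.pyGetD g 0 []).length := by
  cases g with
  | nil => simp at h
  | cons a t =>
    simp [pvGrid', PySem.List.pyGetD_zero, List.range_succ_eq_map]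

lemma pvGrid'_rect (g : List (List String)) : pvRect (pvGrid' g) := by
  intro row hmem
  have hne : g ≠ [] := by
    intro he
    subst he
    simp [pvGrid'] at hmem
  rw [pvGrid'_cols g hne]
  unfold pvGrid' at hmem
  obtain ⟨i, hi, rfl⟩ := List.mem_map.mp hmem
  simp

lemma pvAt_nil (r c : Int) : pvAt [] r c = 0 := by
  unfold pvAt
  split_ifs
  · simp [pvIndO]
  · rfl

-- live indicator after one synchronous step
lemma pvAt_step (g : List (List String)) (hR : pvRect g) (r c : Int) :
    pvAt (pvGrid' g) r c
      = if pvAt g r c = 1 ∧ ¬ pvDeg g r c < 4 then 1 else 0 := by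
  by_cases hb : 0 ≤ r ∧ r < (g.length : Int) ∧ 0 ≤ c ∧ c < ((PySem.List.pyGetD g 0 []).length : Int)
  · obtain ⟨h0, h1, h2, h3⟩ := hb
    have hrn : r.toNat < g.length := by omega
    have hcn : c.toNat < (PySem.List.pyGetD g 0 []).length := by omega
    have hL : pvAt (pvGrid' g) r c = pvInd (pvOut g r c) := by
      unfold pvAt pvGrid'
      rw [if_pos ⟨h0, h2⟩]
      simp only [List.getElem?_map, List.getElem?_range, hrn, hcn,
        Option.map_some, Option.bind_some]
      have hr' : Int.ofNat r.toNat = r := by show ((r.toNat : Nat) : Int) = r; omega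
      have hc' : Int.ofNat c.toNat = c := by show ((c.toNat : Nat) : Int) = c; omega
      rw [hr', hc']
      rfl
    rw [hL, pvAt_ind g hR r c h0 h1 h2 h3]
    unfold pvOut pvInd
    rw [pvAdjacent_eq_deg g hR]
    by_cases hsc : pvScan g r c = "@" <;> by_cases hd : pvDeg g r c < 4 <;>
      simp [hsc, hd]
  · have hg0 : pvAt g r c ≠ 1 := fun h => hb (pvAt_one_bounds g hR r c h)
    rw [if_neg (fun hc' => hg0 hc'.1)]
    rcases pvAt01 (pvGrid' g) r c with h0 | h1
    · exact h0
    · exfalso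
      have hne : g ≠ [] := by
        intro he
        subst he
        rw [show pvGrid' ([] : List (List String)) = [] from rfl, pvAt_nil] at h1
        exact absurd h1 (by norm_num)
      have hbs := pvAt_one_bounds (pvGrid' g) (pvGrid'_rect g) r c h1
      have hlen : (pvGrid' g).length = g.length := by
        unfold pvGrid'
        simp
      rw [hlen, pvGrid'_cols g hne] at hbs
      exact hb hbs

-- every freshly weak cell is a neighbour of a removed cell
lemma pvFrontier (g : List (List String)) (hR : pvRect g)
    (W : List (Int × Int))
    (hW : ∀ p : Int × Int, p ∈ W ↔ pvAt g p.1 p.2 = 1 ∧ pvDeg g p.1 p.2 < 4)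
    (p : Int × Int) (h1 : pvAt (pvGrid' g) p.1 p.2 = 1)
    (h2 : pvDeg (pvGrid' g) p.1 p.2 < 4) :
    p ∈ W.flatMap (fun q => bDirs.map (fun d => (q.1 + d.1, q.2 + d.2))) := by
  rw [pvAt_step g hR] at h1
  by_cases hcond : pvAt g p.1 p.2 = 1 ∧ ¬ pvDeg g p.1 p.2 < 4
  swap
  · rw [if_neg hcond] at h1
    exact absurd h1 (by norm_num)
  obtain ⟨hp1, hp4⟩ := hcond
  have hex : ∃ d ∈ pvDirs, pvAt (pvGrid' g) (p.1 + d.1) (p.2 + d.2)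
      < pvAt g (p.1 + d.1) (p.2 + d.2) := by
    by_contra hno
    push_neg at hno
    have hle : pvDeg g p.1 p.2 ≤ pvDeg (pvGrid' g) p.1 p.2 := by
      unfold pvDeg
      exact List.sum_le_sum (fun d hd => hno d hd)
    omega
  obtain ⟨d, hd, hlt⟩ := hex
  have hA1 : pvAt g (p.1 + d.1) (p.2 + d.2) = 1 := by
    rcases pvAt01 g (p.1 + d.1) (p.2 + d.2) with h | h
    · rcases pvAt01 (pvGrid' g) (p.1 + d.1) (p.2 + d.2) with h' | h' <;> omega
    · exact h
  have hA0 : pvAt (pvGrid' g) (p.1 + d.1) (p.2 + d.2) = 0 := by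
    rcases pvAt01 (pvGrid' g) (p.1 + d.1) (p.2 + d.2) with h | h
    · exact h
    · omega
  have hdeg : pvDeg g (p.1 + d.1) (p.2 + d.2) < 4 := by
    by_contra hge
    rw [pvAt_step g hR, if_pos ⟨hA1, hge⟩] at hA0
    exact absurd hA0 (by norm_num)
  have hqW : ((p.1 + d.1, p.2 + d.2) : Int × Int) ∈ W := (hW _).mpr ⟨hA1, hdeg⟩
  rw [List.mem_flatMap]
  refine ⟨(p.1 + d.1, p.2 + d.2), hqW, ?_⟩
  rw [List.mem_map]
  refine ⟨(-d.1, -d.2), ?_, ?_⟩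
  · have hneg : ∀ d ∈ pvDirs, (((-d.1, -d.2) : Int × Int) ∈ bDirs) := by decide
    exact hneg d hd
  · obtain ⟨a, b⟩ := p
    simp only [Prod.mk.injEq]
    constructor <;> ring

-- a live-set is no larger than the total number of '@' cells
lemma pvMapGetD (row : List String) : ∀ n, n ≤ row.length →
    (List.range n).map (fun j => row.getD j "") = row.take n := by
  intro n
  induction n with
  | zero => intro _; simp
  | succ n ih =>
    intro h
    rw [List.range_succ, List.map_append, ih (by omega), List.take_succ]
    simp [List.getD, List.getElem?_eq_getElem (show n < row.length by omega)]

lemma pvRowsSum (g : List (List String)) :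
    ((List.range g.length).map (fun i => (g.getD i []).count "@")).sum
      = pvCountAllNat g := by
  unfold pvCountAllNat
  induction g with
  | nil => simp
  | cons a t ih =>
    simp only [List.length_cons, List.range_succ_eq_map, List.map_cons, List.map_map,
      Function.comp_def, List.getD_cons_zero, List.getD_cons_succ, List.sum_cons]
    rw [ih]

lemma pvGood_length (g : List (List String)) (hR : pvRect g)
    (S : List (Int × Int)) (hG : pvGood g S) : S.length ≤ pvCountAllNat g := by
  have hlen : S.length = ((pvAllPos (g.length : Int)
      (((PySem.List.pyGetD g 0 []).length : Int))).filter
        (fun p => decide (pvAt g p.1 p.2 = 1))).length := by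
    apply pvLenEq
    · exact hG.1
    · exact (pvNodup_allPos g.length ((PySem.List.pyGetD g 0 []).length)).filter _
    · intro p
      rw [List.mem_filter, pvMem_allPos, hG.2 p]
      constructor
      · intro h
        exact ⟨pvAt_one_bounds g hR p.1 p.2 h, by simpa using h⟩
      · rintro ⟨-, h⟩
        simpa using h
  rw [hlen, ← List.countP_eq_length_filter]
  unfold pvAllPos
  rw [List.countP_flatMap, PySem.List.pyRange_zero_natCast, PySem.List.pyRange_zero_natCast,
    List.map_map]
  have hbound : ∀ i ∈ List.range g.length,
      ((List.countP (fun p : Int × Int => decide (pvAt g p.1 p.2 = 1)) ∘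
        (fun row : Int => (List.map (fun k : Nat => (k : Int)) (List.range ((PySem.List.pyGetD g 0 []).length))).map (fun j => (row, j)))) ∘ (fun k : Nat => (k : Int))) i
      ≤ (g.getD i []).count "@" := by
    intro i hi
    rw [List.mem_range] at hi
    simp only [Function.comp_apply, List.map_map, List.countP_map]
    have hrowmem : g.getD i [] ∈ g := by
      rw [List.getD_eq_getElem g [] hi]
      exact List.getElem_mem hi
    have hrlen : (g.getD i []).length = (PySem.List.pyGetD g 0 []).length := hR _ hrowmem
    have hcong : ∀ j ∈ List.range ((PySem.List.pyGetD g 0 []).length),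
        (((fun p : Int × Int => decide (pvAt g p.1 p.2 = 1)) ∘ ((fun j : Int => ((i : Int), j)) ∘ (fun k : Nat => (k : Int)))) j = true
        ↔ ((fun s => s == "@") ∘ (fun j : Nat => (g.getD i []).getD j "")) j = true) := by
      intro j hj
      rw [List.mem_range] at hj
      simp only [Function.comp_apply]
      have hiff := pvAt_one_iff_scan g hR (i : Int) (j : Int)
        (by omega) (by exact_mod_cast hi) (by omega) (by exact_mod_cast hj)
      have hscan : pvScan g (i : Int) (j : Int) = (g.getD i []).getD j "" := by
        unfold pvScan
        rw [PySem.List.pyGetD_natCast, PySem.List.pyGetD_natCast]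
      rw [hscan] at hiff
      by_cases hx : (g.getD i []).getD j "" = "@"
      · simp [hiff]
      · simp [hiff]
    rw [List.countP_congr hcong, ← List.countP_map,
      pvMapGetD (g.getD i []) ((PySem.List.pyGetD g 0 []).length) (by omega),
      List.take_of_length_le (by omega)]
    rfl
  calc ((List.range g.length).map _).sum
      ≤ ((List.range g.length).map (fun i => (g.getD i []).count "@")).sum :=
        List.sum_le_sum hbound
    _ = pvCountAllNat g := pvRowsSum g

-- the two loops agree
lemma pvLoop_main : ∀ (fA : Nat) (g : List (List String)) (S W : List (Int × Int))
    (fB : Nat) (p1 p2 : Int),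
    S.length < fA → S.length < fB → pvRect g → pvGood g S → W.Nodup →
    (∀ p : Int × Int, p ∈ W ↔ p ∈ S ∧ pvDeg g p.1 p.2 < 4) →
    pvSolveLoop fA p1 p2 g
      = ((if W = [] then p1 else if p1 = -1 then (W.length : Int) else p1),
         bLoop fB S W p2) := by
  intro fA
  induction fA with
  | zero =>
    intro g S W fB p1 p2 hA
    omega
  | succ fA ih =>
    intro g S W fB p1 p2 hA hB hR hG hWn hW
    match fB, hB with
    | fB + 1, hB =>
    have hWat : ∀ p : Int × Int, p ∈ W ↔ pvAt g p.1 p.2 = 1 ∧ pvDeg g p.1 p.2 < 4 := by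
      intro p
      rw [hW p, hG.2 p]
    have ht : (pvTryRemove g).1 = (W.length : Int) := pvTryRemove_fst g hR W hWn hWat
    by_cases hWe : W = []
    · subst hWe
      simp only [pvSolveLoop, bLoop, ht]
      simp
    · have hlen : (0 : Int) < (W.length : Int) := by
        cases W with
        | nil => exact absurd rfl hWe
        | cons a t => simp
      have htne : ¬ (pvTryRemove g).1 = 0 := by
        rw [ht]
        omega
      have hR' : pvRect (pvGrid' g) := pvGrid'_rect g
      have hG' : pvGood (pvGrid' g) (PySem.Set.diff S W) := by
        constructor
        · exact PySem.Set.nodup_diff S W hG.1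
        · intro p
          rw [PySem.Set.mem_diff, hG.2 p, hW p, pvAt_step g hR p.1 p.2]
          constructor
          · rintro ⟨hat, hnw⟩
            have hnd : ¬ pvDeg g p.1 p.2 < 4 := fun hdl => hnw ⟨(hG.2 p).mpr hat, hdl⟩
            rw [if_pos ⟨hat, hnd⟩]
          · intro h
            by_cases hcond : pvAt g p.1 p.2 = 1 ∧ ¬ pvDeg g p.1 p.2 < 4
            · exact ⟨hcond.1, fun hx => hcond.2 hx.2⟩
            · rw [if_neg hcond] at h
              exact absurd h (by norm_num)
      have hWmemS : ∀ p ∈ W, p ∈ S := fun p hp => ((hW p).mp hp).1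
      have hlenS' : (PySem.Set.diff S W).length < S.length := by
        have hsub : (PySem.Set.diff S W).toFinset ⊆ S.toFinset := by
          intro x hx
          rw [List.mem_toFinset] at *
          exact ((PySem.Set.mem_diff S W x).mp hx).1
        obtain ⟨w, hw⟩ := List.exists_mem_of_ne_nil W hWe
        have hwS : w ∈ S.toFinset := List.mem_toFinset.mpr (hWmemS w hw)
        have hwS' : w ∉ (PySem.Set.diff S W).toFinset := by
          rw [List.mem_toFinset, PySem.Set.mem_diff]
          rintro ⟨-, hnw⟩
          exact hnw hw
        have hss : (PySem.Set.diff S W).toFinset ⊂ S.toFinset :=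
          ⟨hsub, fun hsup => hwS' (hsup hwS)⟩
        have hc := Finset.card_lt_card hss
        rwa [List.toFinset_card_of_nodup (PySem.Set.nodup_diff S W hG.1),
          List.toFinset_card_of_nodup hG.1] at hc
      have hW'n : (PySem.Set.ofList ((PySem.Set.inter
          (PySem.Set.ofList (W.flatMap (fun p => bDirs.map (fun d => (p.1 + d.1, p.2 + d.2)))))
          (PySem.Set.diff S W)).filter (fun p => bWeak (PySem.Set.diff S W) p))).Nodup :=
        PySem.Set.nodup_ofList _
      have hW'char : ∀ p : Int × Int, p ∈ (PySem.Set.ofList ((PySem.Set.inter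
          (PySem.Set.ofList (W.flatMap (fun p => bDirs.map (fun d => (p.1 + d.1, p.2 + d.2)))))
          (PySem.Set.diff S W)).filter (fun p => bWeak (PySem.Set.diff S W) p)))
          ↔ p ∈ PySem.Set.diff S W ∧ pvDeg (pvGrid' g) p.1 p.2 < 4 := by
        intro p
        rw [PySem.Set.mem_ofList, List.mem_filter, PySem.Set.mem_inter, PySem.Set.mem_ofList]
        constructor
        · rintro ⟨⟨hflat, hpS'⟩, hweak⟩
          exact ⟨hpS', (bWeak_iff (pvGrid' g) (PySem.Set.diff S W) hG' p).mp hweak⟩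
        · rintro ⟨hpS', hdeg⟩
          have hp1 : pvAt (pvGrid' g) p.1 p.2 = 1 := (hG'.2 p).mp hpS'
          exact ⟨⟨pvFrontier g hR W hWat p hp1 hdeg, hpS'⟩,
            (bWeak_iff (pvGrid' g) (PySem.Set.diff S W) hG' p).mpr hdeg⟩
      have hstepA : pvSolveLoop (fA + 1) p1 p2 g
          = pvSolveLoop fA (if p1 = -1 then (W.length : Int) else p1)
              (p2 + (W.length : Int)) (pvGrid' g) := by
        simp only [pvSolveLoop]
        rw [if_neg htne, ht, pvTryRemove_snd]
      rw [hstepA]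
      rw [ih (pvGrid' g) (PySem.Set.diff S W) _ fB _ _ (by omega) (by omega) hR' hG' hW'n hW'char]
      have hstepB : bLoop (fB + 1) S W p2
          = bLoop fB (PySem.Set.diff S W)
              (PySem.Set.ofList ((PySem.Set.inter
                (PySem.Set.ofList (W.flatMap (fun p => bDirs.map (fun d => (p.1 + d.1, p.2 + d.2)))))
                (PySem.Set.diff S W)).filter (fun p => bWeak (PySem.Set.diff S W) p)))
              (p2 + (W.length : Int)) := by
        simp only [bLoop]
        rw [if_neg hWe]
        rfl
      rw [hstepB]
      congr 1
      by_cases hp1 : p1 = -1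
      · have hne1 : ¬ ((W.length : Int) = -1) := by omega
        simp [hp1, hne1, hWe]
      · simp [hp1, hWe]

-- ===== truncation: A (and B's live set) only read the first cols entries of each row =====

lemma pvTrunc_scan (g : List (List String)) (hne : g ≠ []) (hP : Pre_solve g) :
    ∀ r c : Int, 0 ≤ r → r < (g.length : Int) → 0 ≤ c →
      c < ((PySem.List.pyGetD g 0 []).length : Int) →
      PySem.List.pyGetD (PySem.List.pyGetD
          (g.map (fun row => row.take ((PySem.List.pyGetD g 0 []).length))) r []) c ""
        = PySem.List.pyGetD (PySem.List.pyGetD g r []) c "" := by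
  have hall := hP
  intro r c h0 h1 h2 h3
  have hrn : r.toNat < g.length := by omega
  have hrow : (g[r.toNat]).length ≥ (PySem.List.pyGetD g 0 []).length := by
    have := hall _ (List.getElem_mem hrn)
    cases g with
    | nil => simp at hne
    | cons a t => simpa [PySem.List.pyGetD_zero] using this
  have htake : ((g[r.toNat]).take ((PySem.List.pyGetD g 0 []).length)).length
      = (PySem.List.pyGetD g 0 []).length := by simp; omega
  rw [PySem.List.pyGetD_eq_getElem _ _ h0 (by simpa using h1),
      PySem.List.pyGetD_eq_getElem _ _ h0 h1]
  rw [List.getElem_map]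
  rw [PySem.List.pyGetD_eq_getElem _ _ h2 (by rw [htake]; exact_mod_cast h3),
      PySem.List.pyGetD_eq_getElem _ _ h2 (by omega)]
  rw [List.getElem_take]

lemma pvTrunc_len (g : List (List String)) (hne : g ≠ []) (hP : Pre_solve g) :
    (PySem.List.pyGetD (g.map (fun row => row.take ((PySem.List.pyGetD g 0 []).length))) 0 []).length
      = (PySem.List.pyGetD g 0 []).length := by
  have hall := hP
  cases g with
  | nil => simp at hne
  | cons a t =>
    have := hall a List.mem_cons_self
    simp only [List.headD_cons] at this
    simp [PySem.List.pyGetD_zero]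

lemma pvTrunc_adj (g : List (List String)) (hne : g ≠ []) (hP : Pre_solve g) (row col : Int) :
    pvAdjacent (g.map (fun r => r.take ((PySem.List.pyGetD g 0 []).length))) row col
      = pvAdjacent g row col := by
  unfold pvAdjacent
  congr 1
  funext acc d
  simp only []
  refine if_congr ?_ rfl rfl
  rw [List.length_map, pvTrunc_len g hne hP]
  constructor
  · rintro ⟨h1, h2, h3, h4, h5⟩
    exact ⟨h1, h2, h3, h4, by rw [← pvTrunc_scan g hne hP _ _ h1 h2 h3 h4]; exact h5⟩
  · rintro ⟨h1, h2, h3, h4, h5⟩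
    exact ⟨h1, h2, h3, h4, by rw [pvTrunc_scan g hne hP _ _ h1 h2 h3 h4]; exact h5⟩

lemma pvTryRemove_trunc (g : List (List String)) (hne : g ≠ []) (hP : Pre_solve g) :
    pvTryRemove g = pvTryRemove (g.map (fun row => row.take ((PySem.List.pyGetD g 0 []).length))) := by
  rw [pvTryRemove_eq g, pvTryRemove_eq (g.map (fun row => row.take ((PySem.List.pyGetD g 0 []).length)))]
  rw [List.length_map, pvTrunc_len g hne hP, Prod.mk.injEq]
  constructor
  · congr 1
    apply List.map_congr_left
    intro row hrow
    congr 1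
    apply List.map_congr_left
    intro col hcol
    rw [PySem.List.mem_pyRange_one] at hrow hcol
    unfold pvDelta pvScan
    rw [pvTrunc_scan g hne hP row col (by omega) (by omega) (by omega) (by omega),
        pvTrunc_adj g hne hP row col]
  · apply List.map_congr_left
    intro row hrow
    apply List.map_congr_left
    intro col hcol
    rw [PySem.List.mem_pyRange_one] at hrow hcol
    unfold pvOut pvScan
    rw [pvTrunc_scan g hne hP row col (by omega) (by omega) (by omega) (by omega),
        pvTrunc_adj g hne hP row col]

lemma pvSolveLoop_trunc (g : List (List String)) (hne : g ≠ []) (hP : Pre_solve g) (fuel : Nat) (p1 p2 : Int) :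
    pvSolveLoop fuel p1 p2 g =
      pvSolveLoop fuel p1 p2 (g.map (fun row => row.take ((PySem.List.pyGetD g 0 []).length))) := by
  cases fuel with
  | zero => rfl
  | succ fuel =>
    simp only [pvSolveLoop]
    rw [← pvTryRemove_trunc g hne hP]

lemma pvCount_trunc (g : List (List String)) (n : Nat) :
    pvCountAllNat (g.map (fun row => row.take n)) ≤ pvCountAllNat g := by
  unfold pvCountAllNat
  induction g with
  | nil => simp
  | cons a t ih =>
    simp only [List.map_cons, List.sum_cons]
    have := (List.take_sublist n a).count_le "@"
    omega

lemma pvRect_trunc (g : List (List String)) (hne : g ≠ []) (hP : Pre_solve g) :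
    pvRect (g.map (fun row => row.take ((PySem.List.pyGetD g 0 []).length))) := by
  have hall := hP
  intro row hm
  obtain ⟨r, hrm, rfl⟩ := List.mem_map.mp hm
  rw [pvTrunc_len g hne hall]
  have : (PySem.List.pyGetD g 0 []).length ≤ r.length := by
    cases g with
    | nil => simp at hne
    | cons a t => simpa [PySem.List.pyGetD_zero] using hall r hrm
  simp
  omega

-- B's initial live set is exactly the live cells of the truncated grid
lemma pvLive_good (g : List (List String)) (hne : g ≠ []) (hP : Pre_solve g) :
    pvGood (g.map (fun row => row.take ((PySem.List.pyGetD g 0 []).length)))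
      (bLive g (g.length : Int) (((PySem.List.pyGetD g 0 []).length : Int))) := by
  have hRt := pvRect_trunc g hne hP
  have hlg : ((g.map (fun row => row.take ((PySem.List.pyGetD g 0 []).length))).length) = g.length := by
    simp
  have hcols := pvTrunc_len g hne hP
  constructor
  · exact PySem.Set.nodup_ofList _
  · intro p
    unfold bLive
    rw [PySem.Set.mem_ofList, List.mem_flatMap]
    constructor
    · rintro ⟨i, hi, hp⟩
      rw [List.mem_map] at hp
      obtain ⟨j, hj, hpj⟩ := hp
      rw [List.mem_filter] at hj
      obtain ⟨hj1, hj2⟩ := hj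
      rw [PySem.List.mem_pyRange_one] at hi hj1
      have hsc : pvScan g i j = "@" := of_decide_eq_true hj2
      subst hpj
      apply (pvAt_one_iff_scan _ hRt i j hi.1 (by rw [hlg]; exact hi.2) hj1.1
        (by rw [hcols]; exact hj1.2)).mpr
      have hts : pvScan (g.map (fun row => row.take ((PySem.List.pyGetD g 0 []).length))) i j
          = pvScan g i j := pvTrunc_scan g hne hP i j hi.1 hi.2 hj1.1 hj1.2
      rw [hts]
      exact hsc
    · intro h1
      have hb := pvAt_one_bounds _ hRt p.1 p.2 h1
      have hb2 : p.1 < (g.length : Int) := by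
        have := hb.2.1
        rwa [hlg] at this
      have hb4 : p.2 < ((PySem.List.pyGetD g 0 []).length : Int) := by
        have := hb.2.2.2
        rwa [hcols] at this
      have hsc : pvScan g p.1 p.2 = "@" := by
        have hx := (pvAt_one_iff_scan _ hRt p.1 p.2 hb.1 hb.2.1 hb.2.2.1 hb.2.2.2).mp h1
        have hts : pvScan (g.map (fun row => row.take ((PySem.List.pyGetD g 0 []).length))) p.1 p.2
            = pvScan g p.1 p.2 := pvTrunc_scan g hne hP p.1 p.2 hb.1 hb2 hb.2.2.1 hb4
        rwa [hts] at hx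
      refine ⟨p.1, ?_, ?_⟩
      · rw [PySem.List.mem_pyRange_one]
        exact ⟨hb.1, hb2⟩
      · rw [List.mem_map]
        refine ⟨p.2, ?_, ?_⟩
        · rw [List.mem_filter]
          refine ⟨?_, decide_eq_true hsc⟩
          rw [PySem.List.mem_pyRange_one]
          exact ⟨hb.2.2.1, hb4⟩
        · exact Prod.mk.eta

theorem solve_spec' : ∀ (grid : List (List String)), Dom_solve grid → Pre_solve grid →
    solve grid = solve_alt grid := by
  intro grid hdom hpre
  by_cases hne : grid = []
  · subst hne
    rfl
  · have hRt := pvRect_trunc grid hne hpre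
    have hGood := pvLive_good grid hne hpre
    have hW0 : ∀ p : Int × Int,
        p ∈ PySem.Set.ofList ((bLive grid (grid.length : Int)
            (((PySem.List.pyGetD grid 0 []).length : Int))).filter
          (fun p => bWeak (bLive grid (grid.length : Int)
            (((PySem.List.pyGetD grid 0 []).length : Int))) p))
        ↔ p ∈ bLive grid (grid.length : Int) (((PySem.List.pyGetD grid 0 []).length : Int))
            ∧ pvDeg (grid.map (fun row => row.take ((PySem.List.pyGetD grid 0 []).length))) p.1 p.2 < 4 := by
      intro p
      rw [PySem.Set.mem_ofList, List.mem_filter]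
      constructor
      · rintro ⟨hm, hw⟩
        exact ⟨hm, (bWeak_iff _ _ hGood p).mp hw⟩
      · rintro ⟨hm, hd⟩
        exact ⟨hm, (bWeak_iff _ _ hGood p).mpr hd⟩
    have hS0len : (bLive grid (grid.length : Int)
        (((PySem.List.pyGetD grid 0 []).length : Int))).length ≤ pvCountAllNat grid :=
      le_trans (pvGood_length _ hRt _ hGood) (pvCount_trunc grid _)
    unfold solve solve_alt
    rw [pvSolveLoop_trunc grid hne hpre]
    rw [pvLoop_main (pvCountAllNat grid + 1)
      (grid.map (fun row => row.take ((PySem.List.pyGetD grid 0 []).length)))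
      (bLive grid (grid.length : Int) (((PySem.List.pyGetD grid 0 []).length : Int)))
      (PySem.Set.ofList ((bLive grid (grid.length : Int)
          (((PySem.List.pyGetD grid 0 []).length : Int))).filter
        (fun p => bWeak (bLive grid (grid.length : Int)
          (((PySem.List.pyGetD grid 0 []).length : Int))) p)))
      ((bLive grid (grid.length : Int) (((PySem.List.pyGetD grid 0 []).length : Int))).length + 1)
      (-1) 0 (by omega) (by omega) hRt hGood (PySem.Set.nodup_ofList _) hW0]
    simp only [if_neg hne]
    by_cases hW0e : PySem.Set.ofList ((bLive grid (grid.length : Int)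
        (((PySem.List.pyGetD grid 0 []).length : Int))).filter
      (fun p => bWeak (bLive grid (grid.length : Int)
        (((PySem.List.pyGetD grid 0 []).length : Int))) p)) = ([] : List (Int × Int))
    · simp [hW0e]
    · simp [hW0e]

-- ===== VERDICT (by name: the statement is the Claim_ definition above) =====
theorem solve_spec : Claim_equal_solve := by
  intro grid hdom hpre
  exact solve_spec' grid hdom hpre
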